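-- pv_equiv track=rewrite | github.com/Freshield/LEARN_ACM_Challenge | carl_algorithm/a19_call_money_letter.py | call_money_letter
-- ===== SOURCE A (Python) =====
-- def call_money_letter(word1, word2):
--     """
--     赎金信，看word1可不可以完全有word2的字符来组成
--     1. 建立word字典
--     2. 遍历word2生成word字典
--     3. 遍历word1
--     4. 看当前字符是否在字典中且值不为零
--     5. 否则的话把相应的值减一
--     """
--     # 1. 建立word字典
--     word_dict = dict()
--     # 2. 遍历word2生成word字典
--     for word in word2:
--         word_dict[word] = word_dict.get(word, 0) + 1
--
--     # 3. 遍历word1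
--     for word in word1:
--         # 4. 看当前字符是否在字典中且值不为零
--         if (word not in word_dict) or (word_dict[word] == 0):
--             return False
--
--         # 5. 否则的话把相应的值减一
--         word_dict[word] -= 1
--
--     return True
-- ===== SOURCE B (Python) =====
-- def call_money_letter(word1, word2):
--     # Count both words independently, then compare the two frequency tables:
--     # word1 fits in word2 iff no character of word1 is needed more often than available.
--     need = {}
--     for c in word1:
--         need[c] = need.get(c, 0) + 1
--     have = {}
--     for c in word2:
--         have[c] = have.get(c, 0) + 1
--     return all(have.get(c, 0) >= n for c, n in need.items())
-- ===== Notes on version B (the rewrite author's own statement) =====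
-- stated objective: alternative
-- what changed: A's single decrement-and-early-return scan over word1 against a mutable count dict is replaced by two independent counting passes plus one multiset-containment comparison of the frequency tables.
import Mathlib
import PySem

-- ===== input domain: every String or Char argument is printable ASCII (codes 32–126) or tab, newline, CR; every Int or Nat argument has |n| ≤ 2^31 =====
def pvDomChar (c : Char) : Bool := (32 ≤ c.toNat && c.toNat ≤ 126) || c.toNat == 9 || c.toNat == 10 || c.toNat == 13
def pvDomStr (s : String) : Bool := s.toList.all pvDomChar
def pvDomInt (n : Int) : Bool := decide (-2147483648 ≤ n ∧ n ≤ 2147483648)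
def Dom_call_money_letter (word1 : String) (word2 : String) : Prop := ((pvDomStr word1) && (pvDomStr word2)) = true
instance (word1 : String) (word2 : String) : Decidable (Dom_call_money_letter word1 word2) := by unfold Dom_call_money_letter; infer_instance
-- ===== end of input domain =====

-- B replaces A's decrement-with-early-exit scan by two independent counting passes
-- plus one frequency-table comparison (alternative decomposition, same cost).

-- ===== PORT A =====
-- word_dict[word] = word_dict.get(word, 0) + 1   (building loop over word2)
def pvBuildDict (cs : List Char) : PySem.Dict Char Int :=
  cs.foldl (fun d c => d.insert c (d.getD c 0 + 1)) PySem.Dict.empty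

-- the 'for word in word1' loop with its early 'return False';
-- 'word_dict[word]' is only read after the 'word not in word_dict' guard, so getD is exact here
def pvLoopA : List Char → PySem.Dict Char Int → Bool
  | [], _ => true
  | c :: rest, d =>
    if (!d.contains c) || (d.getD c 0 == 0) then false
    else pvLoopA rest (d.modify c 0 (· - 1))

def call_money_letter (word1 : String) (word2 : String) : Bool :=
  pvLoopA word1.toList (pvBuildDict word2.toList)

-- ===== PORT B =====
def call_money_letter_alt (word1 : String) (word2 : String) : Bool :=
  let need := word1.toList.foldl (fun d c => d.insert c (d.getD c 0 + 1)) PySem.Dict.empty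
  let avail := word2.toList.foldl (fun d c => d.insert c (d.getD c 0 + 1)) PySem.Dict.empty
  need.items.all (fun p : Char × Int => decide (p.2 ≤ avail.getD p.1 0))

-- ===== PRECONDITION & SPEC =====
def Spec_call_money_letter (word1 : String) (word2 : String) (out : Bool) : Prop := out = call_money_letter_alt word1 word2
instance (word1 : String) (word2 : String) (out : Bool) : Decidable (Spec_call_money_letter word1 word2 out) := by unfold Spec_call_money_letter; infer_instance

-- ===== CLAIM (what is proved, stated in full; the proofs are below) =====
def Claim_equal_call_money_letter : Prop := ∀ (word1 : String) (word2 : String), Dom_call_money_letter word1 word2 → Spec_call_money_letter word1 word2 (call_money_letter word1 word2)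

-- ===== LEMMAS AND PROOFS =====

-- A's scan succeeds iff every character still to be consumed fits in the remaining counts
lemma pvLoopA_eq (cs : List Char) (d : PySem.Dict Char Int) (h : ∀ c, 0 ≤ d.getD c 0) :
    pvLoopA cs d = decide (∀ c ∈ cs, (cs.count c : Int) ≤ d.getD c 0) := by
  induction cs generalizing d with
  | nil => simp [pvLoopA]
  | cons c rest ih =>
    have hguard : ((!d.contains c) || (d.getD c 0 == 0)) = (d.getD c 0 == 0) := by
      cases hc : d.contains c with
      | false => simp [PySem.Dict.getD_of_not_contains d (0 : Int) hc]
      | true => simp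
    rw [pvLoopA, hguard]
    by_cases h0 : d.getD c 0 = 0
    · rw [if_pos (by simpa using h0)]
      symm
      rw [decide_eq_false_iff_not]
      intro hall
      have := hall c (by simp)
      rw [h0, List.count_cons_self] at this
      omega
    · have hpos : 1 ≤ d.getD c 0 := by have := h c; omega
      have hinv : ∀ x, 0 ≤ (d.modify c 0 (· - 1)).getD x 0 := by
        intro x
        rw [PySem.Dict.getD_modify]
        split
        · next hx => subst hx; omega
        · exact h x
      rw [if_neg (by simpa using h0), ih _ hinv]
      apply (decide_eq_decide).mpr
      constructor
      · intro hall x hx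
        by_cases hxc : x = c
        · subst hxc
          by_cases hm : x ∈ rest
          · have := hall x hm
            rw [PySem.Dict.getD_modify, if_pos rfl] at this
            rw [List.count_cons_self]
            push_cast at this ⊢
            omega
          · rw [List.count_cons_self, List.count_eq_zero_of_not_mem hm]
            simpa using hpos
        · rcases List.mem_cons.mp hx with hx | hx
          · exact absurd hx hxc
          · have := hall x hx
            rw [PySem.Dict.getD_modify, if_neg hxc] at this
            rw [List.count_cons_of_ne (Ne.symm hxc)]
            exact this
      · intro hall x hx
        have hx' := hall x (by simp [hx])
        rw [PySem.Dict.getD_modify]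
        by_cases hxc : x = c
        · subst hxc
          rw [List.count_cons_self] at hx'
          rw [if_pos rfl]
          push_cast at hx' ⊢
          omega
        · rw [List.count_cons_of_ne (Ne.symm hxc)] at hx'
          simpa [hxc] using hx'

-- ===== VERDICT (by name: the statement is the Claim_ definition above) =====
theorem call_money_letter_spec : Claim_equal_call_money_letter := by
  intro word1 word2 _
  unfold Spec_call_money_letter call_money_letter call_money_letter_alt pvBuildDict
  rw [PySem.Dict.foldl_insert_getD_add_one_eq_counter (xs := word1.toList),
      PySem.Dict.foldl_insert_getD_add_one_eq_counter (xs := word2.toList)]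
  show pvLoopA word1.toList (PySem.Dict.counter word2.toList) =
    (PySem.Dict.counter word1.toList).items.all
      (fun p : Char × Int => decide (p.2 ≤ (PySem.Dict.counter word2.toList).getD p.1 0))
  rw [pvLoopA_eq _ _ (fun c => by rw [PySem.Dict.getD_counter]; positivity)]
  rw [PySem.Dict.items_counter]
  rw [Bool.eq_iff_iff]
  simp only [List.all_map, List.all_eq_true, Function.comp_apply, decide_eq_true_eq,
    PySem.Dict.getD_counter, PySem.Set.mem_ofList]
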